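-- pv_equiv track=rewrite | github.com/GodOrGovern/Project_Euler | problems/Python/e160.py | mults_of_nums
-- ===== SOURCE A (Python) =====
-- def mults_of_nums(nums, end):
--     ''' Return a set containing all numbers <= end whose prime factors are a
--     subset of nums (including 1 for the empty set) '''
--     nums = sorted(nums)
--     # sets are used because this process generates duplicates
--     mults = {1}
--     prev = {1}
--     while min(nums)*min(prev) <= end:
--         cur = set()
--         for p in prev:
--             for n in nums:
--                 temp = n*p
--                 # nums needs to be sorted for this optimization
--                 if temp > end:
--                     break
--                 cur.add(temp)
--         mults.update(cur)
--         prev = cur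
--     return mults
-- ===== SOURCE B (Python) =====
-- def mults_of_nums(nums, end):
--     ''' Return a set containing all numbers <= end whose prime factors are a
--     subset of nums (including 1 for the empty set) '''
--     srt = sorted(nums)
--     result = {1}
--
--     def rec(start, value):
--         # extend the canonical non-decreasing factor sequence of `value`
--         for i in range(start, len(srt)):
--             temp = srt[i] * value
--             # srt is sorted ascending, so once temp > end no later factor helps
--             if temp > end:
--                 break
--             result.add(temp)
--             rec(i, temp)
--
--     rec(0, 1)
--     return result
-- ===== Notes on version B (the rewrite author's own statement) =====
-- stated objective: alternative
-- what changed: Replaces A's layered fixpoint (which regenerates every product once per ordered factorization and deduplicates through three sets per round) by a recursive DFS over canonical non-decreasing factor sequences, producing each smooth number exactly once.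
-- outside the precondition, e.g. on mults_of_nums([-2, 3], 10): A returns {1, 3, 4, 9, -6, -2}, B raises RecursionError
import Mathlib
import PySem

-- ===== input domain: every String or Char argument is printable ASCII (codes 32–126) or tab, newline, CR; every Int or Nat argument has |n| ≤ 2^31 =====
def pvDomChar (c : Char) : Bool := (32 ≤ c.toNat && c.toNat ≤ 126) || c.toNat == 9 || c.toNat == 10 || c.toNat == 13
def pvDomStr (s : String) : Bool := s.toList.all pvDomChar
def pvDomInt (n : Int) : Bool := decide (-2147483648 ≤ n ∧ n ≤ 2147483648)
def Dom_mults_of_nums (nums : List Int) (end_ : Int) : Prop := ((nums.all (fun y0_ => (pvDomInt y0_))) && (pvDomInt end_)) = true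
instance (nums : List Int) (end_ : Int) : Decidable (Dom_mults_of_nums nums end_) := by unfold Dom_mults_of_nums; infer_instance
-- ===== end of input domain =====

-- B replaces A's layered fixpoint with a DFS over canonical non-decreasing factor
-- sequences, generating each smooth number exactly once (objective: alternative).
-- Both Pythons return a set; Python's set iteration order is not modelled, so both
-- ports return the set's distinct elements in ascending order (equal as a set).

-- ===== PORT A =====
-- inner 'for n in nums: temp = n*p; if temp > end: break; cur.add(temp)'
def multsInnerA (end_ p : Int) : List Int → PySem.Set Int → PySem.Set Int
  | [], cur => cur
  | n :: rest, cur =>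
    if n * p > end_ then cur
    else multsInnerA end_ p rest (PySem.Set.add cur (n * p))

-- 'cur = set(); for p in prev: <inner loop>'  (cur as a set does not depend on the
-- iteration order over the set prev, so iterating prev's list is exact)
def multsCurA (nums_s : List Int) (end_ : Int) (prev : PySem.Set Int) : PySem.Set Int :=
  prev.foldl (fun cur p => multsInnerA end_ p nums_s cur) PySem.Set.empty

-- 'while min(nums)*min(prev) <= end: …'; fuel only makes the loop total (Python
-- diverges on some inputs outside Pre_); min of an empty list is a ValueError (none).
def multsLoopA (nums_s : List Int) (end_ : Int) : Nat → PySem.Set Int → PySem.Set Int → PySem.Set Int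
  | 0, mults, _prev => mults
  | fuel + 1, mults, prev =>
    match PySem.List.min? nums_s (fun x => x), PySem.List.min? prev (fun x => x) with
    | some mn, some mp =>
      if mn * mp ≤ end_ then
        multsLoopA nums_s end_ fuel (PySem.Set.update mults (multsCurA nums_s end_ prev)) (multsCurA nums_s end_ prev)
      else mults
    | _, _ => mults

def mults_of_nums (nums : List Int) (end_ : Int) : List Int :=
  let nums_s := PySem.List.sorted nums (fun x => x) false
  PySem.List.sorted
    (multsLoopA nums_s end_ (end_.toNat + 1) (PySem.Set.add PySem.Set.empty 1) (PySem.Set.add PySem.Set.empty 1))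
    (fun x => x) false

-- ===== PORT B =====
-- 'def rec(start, value): for i in range(start, len(srt)): …' — the suffix of srt from
-- index `start` is passed as a list; rec(i, temp) keeps the same suffix, i+1 drops its head.
-- fuel only makes the recursion total (Python diverges on some inputs outside Pre_).
def multsRecB (end_ : Int) : Nat → List Int → Int → PySem.Set Int → PySem.Set Int
  | _, [], _, res => res
  | 0, _ :: _, _, res => res
  | fuel + 1, n :: rest, value, res =>
    if n * value > end_ then res
    else
      multsRecB end_ fuel rest value
        (multsRecB end_ fuel (n :: rest) (n * value) (PySem.Set.add res (n * value)))

def mults_of_nums_alt (nums : List Int) (end_ : Int) : List Int :=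
  let srt := PySem.List.sorted nums (fun x => x) false
  PySem.List.sorted
    (multsRecB end_ (end_.toNat + srt.length + 1) srt 1 (PySem.Set.add PySem.Set.empty 1))
    (fun x => x) false

-- ===== PRECONDITION & SPEC =====
-- Pre_ is the function's natural domain (sets of factors ≥ 2, cf. the docstring)
-- together with the degenerate regions where the loop provably exits at once
-- (every entry > end_, or end_ < 0); outside it A raises ValueError (empty nums),
-- diverges (an entry 0 or 1 with end_ large enough), or — with negative entries and
-- end_ ≥ 0 — returns accidental values because the sorted-ascending break is only
-- valid for positive factors.
def Pre_mults_of_nums (nums : List Int) (end_ : Int) : Prop :=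
  nums ≠ [] ∧ ((∀ n ∈ nums, 2 ≤ n) ∨ (∀ n ∈ nums, end_ < n) ∨ end_ < 0)
instance (nums : List Int) (end_ : Int) : Decidable (Pre_mults_of_nums nums end_) := by
  unfold Pre_mults_of_nums; infer_instance

def pvWitness_mults_of_nums : List Int × Int := ([2, 3], 10)

def Spec_mults_of_nums (nums : List Int) (end_ : Int) (out : List Int) : Prop := out = mults_of_nums_alt nums end_
instance (nums : List Int) (end_ : Int) (out : List Int) : Decidable (Spec_mults_of_nums nums end_ out) := by unfold Spec_mults_of_nums; infer_instance

-- ===== CLAIM (what is proved, stated in full; the proofs are below) =====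
def Claim_equal_mults_of_nums : Prop := ∀ (nums : List Int) (end_ : Int), Dom_mults_of_nums nums end_ → Pre_mults_of_nums nums end_ → Spec_mults_of_nums nums end_ (mults_of_nums nums end_)

-- ===== LEMMAS AND PROOFS =====

def GoodP (nums_s : List Int) (end_ : Int) (x : Int) : Prop :=
  x = 1 ∨ ∃ l : List Int, l ≠ [] ∧ (∀ m ∈ l, m ∈ nums_s) ∧ x = l.prod ∧ x ≤ end_

def PrevP (nums_s : List Int) (end_ : Int) : Nat → Int → Prop
  | 0 => fun x => x = 1
  | k + 1 => fun x => ∃ l : List Int, l.length = k + 1 ∧ (∀ m ∈ l, m ∈ nums_s) ∧ x = l.prod ∧ x ≤ end_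

def MultP (nums_s : List Int) (end_ : Int) (k : Nat) (x : Int) : Prop :=
  x = 1 ∨ ∃ l : List Int, l ≠ [] ∧ l.length ≤ k ∧ (∀ m ∈ l, m ∈ nums_s) ∧ x = l.prod ∧ x ≤ end_

lemma le_prod_of_forall_le {l : List Int} {c : Int} (hne : l ≠ []) (hc : 1 ≤ c)
    (h : ∀ m ∈ l, c ≤ m) (h1 : ∀ m ∈ l, 1 ≤ m) : c ≤ l.prod := by
  cases l with
  | nil => exact absurd rfl hne
  | cons a t =>
    have ha : c ≤ a := h a (List.mem_cons_self ..)
    have ht : 1 ≤ t.prod := List.one_le_prod (fun m hm => h1 m (List.mem_cons_of_mem _ hm))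
    have : a * 1 ≤ a * t.prod := by
      apply mul_le_mul_of_nonneg_left ht (by omega)
    simpa using le_trans ha (by simpa using this)

lemma prevP_one_le {nums_s : List Int} {end_ : Int} (h2 : ∀ m ∈ nums_s, 2 ≤ m)
    {k : Nat} {p : Int} (hp : PrevP nums_s end_ k p) : 1 ≤ p := by
  cases k with
  | zero => simp [PrevP] at hp; omega
  | succ k =>
    obtain ⟨l, _, hmem, rfl, _⟩ := hp
    exact List.one_le_prod (fun m hm => by have := h2 m (hmem m hm); omega)

lemma innerA_mem (end_ p : Int) (hp : 1 ≤ p) :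
    ∀ (l : List Int) (cur : PySem.Set Int), l.Pairwise (· ≤ ·) →
    ∀ x, x ∈ multsInnerA end_ p l cur ↔ x ∈ cur ∨ ∃ n ∈ l, x = n * p ∧ x ≤ end_ := by
  intro l
  induction l with
  | nil => intro cur _ x; simp [multsInnerA]
  | cons n rest ih =>
    intro cur hpair x
    rw [multsInnerA]
    rcases List.pairwise_cons.mp hpair with ⟨hle, hrest⟩
    by_cases hbr : n * p > end_
    · simp only [if_pos hbr]
      constructor
      · intro hx; exact Or.inl hx
      · rintro (hx | ⟨m, hm, rfl, hxe⟩)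
        · exact hx
        · exfalso
          have hnm : n ≤ m := by
            rcases List.mem_cons.mp hm with rfl | hm'
            · exact le_refl _
            · exact hle m hm'
          have : n * p ≤ m * p := mul_le_mul_of_nonneg_right hnm (by omega)
          omega
    · simp only [if_neg hbr]
      rw [ih _ hrest]
      simp only [PySem.Set.mem_add, List.mem_cons]
      constructor
      · rintro ((hx | rfl) | ⟨m, hm, rfl, hxe⟩)
        · exact Or.inl hx
        · exact Or.inr ⟨n, Or.inl rfl, rfl, by omega⟩
        · exact Or.inr ⟨m, Or.inr hm, rfl, hxe⟩
      · rintro (hx | ⟨m, (rfl | hm), rfl, hxe⟩)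
        · exact Or.inl (Or.inl hx)
        · exact Or.inl (Or.inr rfl)
        · exact Or.inr ⟨m, hm, rfl, hxe⟩
lemma curA_fold_mem (nums_s : List Int) (end_ : Int) (hsort : nums_s.Pairwise (· ≤ ·)) :
    ∀ (prev acc : List Int), (∀ p ∈ prev, 1 ≤ p) →
    ∀ x, x ∈ prev.foldl (fun c p => multsInnerA end_ p nums_s c) acc ↔
      x ∈ acc ∨ ∃ p ∈ prev, ∃ n ∈ nums_s, x = n * p ∧ x ≤ end_ := by
  intro prev
  induction prev with
  | nil => intro acc _ x; simp
  | cons p ps ih =>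
    intro acc hp x
    rw [List.foldl_cons, ih _ (fun q hq => hp q (List.mem_cons_of_mem _ hq))]
    rw [innerA_mem end_ p (hp p (List.mem_cons_self ..)) nums_s acc hsort]
    constructor
    · rintro ((hx | ⟨n, hn, rfl, hxe⟩) | ⟨q, hq, n, hn, rfl, hxe⟩)
      · exact Or.inl hx
      · exact Or.inr ⟨p, List.mem_cons_self .., n, hn, rfl, hxe⟩
      · exact Or.inr ⟨q, List.mem_cons_of_mem _ hq, n, hn, rfl, hxe⟩
    · rintro (hx | ⟨q, hq, n, hn, rfl, hxe⟩)
      · exact Or.inl (Or.inl hx)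
      · rcases List.mem_cons.mp hq with rfl | hq'
        · exact Or.inl (Or.inr ⟨n, hn, rfl, hxe⟩)
        · exact Or.inr ⟨q, hq', n, hn, rfl, hxe⟩

lemma curA_mem (nums_s : List Int) (end_ : Int) (hsort : nums_s.Pairwise (· ≤ ·))
    (prev : PySem.Set Int) (hp : ∀ p ∈ prev, 1 ≤ p) :
    ∀ x, x ∈ multsCurA nums_s end_ prev ↔ ∃ p ∈ prev, ∃ n ∈ nums_s, x = n * p ∧ x ≤ end_ := by
  intro x
  unfold multsCurA
  rw [curA_fold_mem nums_s end_ hsort prev PySem.Set.empty hp x]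
  simp [PySem.Set.empty]
lemma loopA_mem (nums_s : List Int) (end_ : Int) (hnsne : nums_s ≠ [])
    (h2 : ∀ m ∈ nums_s, 2 ≤ m) (hsort : nums_s.Pairwise (· ≤ ·)) :
    ∀ (fuel : Nat) (k : Nat) (mults prev : PySem.Set Int),
      prev ≠ [] →
      (∀ p ∈ prev, (end_ - p).toNat < fuel) →
      (∀ x, x ∈ prev ↔ PrevP nums_s end_ k x) →
      (∀ x, x ∈ mults ↔ MultP nums_s end_ k x) →
      ∀ x, x ∈ multsLoopA nums_s end_ fuel mults prev ↔ GoodP nums_s end_ x := by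
  intro fuel
  induction fuel with
  | zero =>
    intro k mults prev hne' hfuel _ _ x
    obtain ⟨p, hp⟩ := List.exists_mem_of_ne_nil prev hne'
    exact absurd (hfuel p hp) (by omega)
  | succ fuel ih =>
    intro k mults prev hne' hfuel hprev hmults x
    have hone : ∀ p ∈ prev, 1 ≤ p := fun p hp => prevP_one_le h2 ((hprev p).mp hp)
    -- nums_s nonempty? derive from nothing: we need min? nums_s to be some; nums_s could be []
    cases hmn : PySem.List.min? nums_s (fun x => x) with
    | none =>
      exact absurd ((PySem.List.min?_eq_none_iff nums_s (fun x => x)).mp hmn) hnsne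
    | some mn =>
      cases hmp : PySem.List.min? prev (fun x => x) with
      | none =>
        exact absurd ((PySem.List.min?_eq_none_iff prev (fun x => x)).mp hmp) hne'
      | some mp =>
        have hmn_mem : mn ∈ nums_s := PySem.List.min?_mem hmn
        have hmp_mem : mp ∈ prev := PySem.List.min?_mem hmp
        have hmn2 : 2 ≤ mn := h2 mn hmn_mem
        have hmp1 : 1 ≤ mp := hone mp hmp_mem
        rw [multsLoopA]
        simp only [hmn, hmp]
        by_cases hc : mn * mp ≤ end_
        · simp only [if_pos hc]
          have hcur : ∀ y, y ∈ multsCurA nums_s end_ prev ↔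
              ∃ p ∈ prev, ∃ n ∈ nums_s, y = n * p ∧ y ≤ end_ :=
            curA_mem nums_s end_ hsort prev hone
          have hcurP : ∀ y, y ∈ multsCurA nums_s end_ prev ↔ PrevP nums_s end_ (k + 1) y := by
            intro y
            rw [hcur y]
            constructor
            · rintro ⟨p, hp, n, hn, rfl, hye⟩
              have hpP := (hprev p).mp hp
              cases k with
              | zero =>
                simp only [PrevP] at hpP
                subst hpP
                exact ⟨[n], by simp, by simpa using hn, by simp, by simpa using hye⟩
              | succ k' =>
                obtain ⟨l, hlen, hm, rfl, _⟩ := hpP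
                exact ⟨n :: l, by simp [hlen], by
                  intro m hm'
                  rcases List.mem_cons.mp hm' with rfl | hm''
                  · exact hn
                  · exact hm m hm'', by simp, hye⟩
            · rintro ⟨l, hlen, hm, rfl, hye⟩
              cases l with
              | nil => simp at hlen
              | cons n l' =>
                have hn : n ∈ nums_s := hm n (List.mem_cons_self ..)
                have hl' : ∀ m ∈ l', m ∈ nums_s := fun m hm' => hm m (List.mem_cons_of_mem _ hm')
                have hp1 : (1 : Int) ≤ l'.prod :=
                  List.one_le_prod (fun m hm' => by have := h2 m (hl' m hm'); omega)
                have hple : l'.prod ≤ end_ := by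
                  have : 1 * l'.prod ≤ n * l'.prod :=
                    mul_le_mul_of_nonneg_right (by have := h2 n hn; omega) (by omega)
                  simp only [List.prod_cons] at hye ⊢
                  omega
                have hpP : PrevP nums_s end_ k l'.prod := by
                  cases k with
                  | zero =>
                    have : l'.length = 0 := by simpa using hlen
                    simp only [PrevP]
                    rw [List.eq_nil_of_length_eq_zero this]
                    simp
                  | succ k' =>
                    exact ⟨l', by simpa using hlen, hl', rfl, hple⟩
                refine ⟨l'.prod, (hprev _).mpr hpP, n, hn, by simp, by simpa using hye⟩
          have hx0 : mn * mp ∈ multsCurA nums_s end_ prev :=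
            (hcur _).mpr ⟨mp, hmp_mem, mn, hmn_mem, rfl, hc⟩
          refine ih (k + 1) _ _ (List.ne_nil_of_mem hx0) ?_ hcurP ?_ x
          · intro q hq
            obtain ⟨p, hp, n, hn, rfl, hqe⟩ := (hcur q).mp hq
            have hp1 := hone p hp
            have hn2 := h2 n hn
            have h2p : 2 * p ≤ n * p := mul_le_mul_of_nonneg_right hn2 (by omega)
            have := hfuel p hp
            omega
          · intro y
            rw [PySem.Set.mem_update, hmults y, hcurP y]
            constructor
            · rintro (hy | hy)
              · rcases hy with rfl | ⟨l, hlne, hlen, hm, rfl, hye⟩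
                · exact Or.inl rfl
                · exact Or.inr ⟨l, hlne, by omega, hm, rfl, hye⟩
              · cases k with
                | zero =>
                  obtain ⟨l, hlen, hm, rfl, hye⟩ := hy
                  exact Or.inr ⟨l, by intro h; simp [h] at hlen, le_of_eq hlen, hm, rfl, hye⟩
                | succ k' =>
                  obtain ⟨l, hlen, hm, rfl, hye⟩ := hy
                  exact Or.inr ⟨l, by intro h; simp [h] at hlen, le_of_eq hlen, hm, rfl, hye⟩
            · rintro (rfl | ⟨l, hlne, hlen, hm, rfl, hye⟩)
              · exact Or.inl (Or.inl rfl)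
              · by_cases hk : l.length ≤ k
                · exact Or.inl (Or.inr ⟨l, hlne, hk, hm, rfl, hye⟩)
                · have hlen' : l.length = k + 1 := by omega
                  exact Or.inr (by
                    cases k with
                    | zero => exact ⟨l, by simpa using hlen', hm, rfl, hye⟩
                    | succ k' => exact ⟨l, hlen', hm, rfl, hye⟩)
        · simp only [if_neg hc]
          rw [hmults x]
          constructor
          · rintro (rfl | ⟨l, hlne, _, hm, rfl, hye⟩)
            · exact Or.inl rfl
            · exact Or.inr ⟨l, hlne, hm, rfl, hye⟩
          · rintro (rfl | ⟨l, hlne, hm, rfl, hye⟩)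
            · exact Or.inl rfl
            · refine Or.inr ⟨l, hlne, ?_, hm, rfl, hye⟩
              by_contra hk
              -- l.length ≥ k+1 : contradiction with loop exit
              set l₁ := l.take k with hl₁
              set l₂ := l.drop k with hl₂
              have hlen₁ : l₁.length = k := by simp [hl₁]; omega
              have hl₂ne : l₂ ≠ [] := by
                simp [hl₂]
                omega
              have hsp : l = l₁ ++ l₂ := (List.take_append_drop k l).symm
              have hm₁ : ∀ m ∈ l₁, m ∈ nums_s := fun m hm' => hm m (hsp ▸ List.mem_append_left _ hm')
              have hm₂ : ∀ m ∈ l₂, m ∈ nums_s := fun m hm' => hm m (hsp ▸ List.mem_append_right _ hm')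
              have hp₁1 : (1 : Int) ≤ l₁.prod :=
                List.one_le_prod (fun m hm' => by have := h2 m (hm₁ m hm'); omega)
              have hp₂1 : (1 : Int) ≤ l₂.prod :=
                List.one_le_prod (fun m hm' => by have := h2 m (hm₂ m hm'); omega)
              have hprodsp : l.prod = l₁.prod * l₂.prod := by rw [hsp, List.prod_append]
              have hp₁le : l₁.prod ≤ end_ := by
                have : l₁.prod * 1 ≤ l₁.prod * l₂.prod :=
                  mul_le_mul_of_nonneg_left hp₂1 (by omega)
                omega
              have hp₁P : PrevP nums_s end_ k l₁.prod := by
                cases k with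
                | zero =>
                  have : l₁ = [] := by simpa using List.eq_nil_of_length_eq_zero hlen₁
                  simp [PrevP, this]
                | succ k' => exact ⟨l₁, hlen₁, hm₁, rfl, hp₁le⟩
              have hp₁prev : l₁.prod ∈ prev := (hprev _).mpr hp₁P
              have hmple : mp ≤ l₁.prod := PySem.List.min?_isMin hmp _ hp₁prev
              have hmnle : mn ≤ l₂.prod :=
                le_prod_of_forall_le hl₂ne (by omega)
                  (fun m hm' => PySem.List.min?_isMin hmn _ (hm₂ m hm'))
                  (fun m hm' => by have := h2 m (hm₂ m hm'); omega)
              have h1 : mn * mp ≤ l₂.prod * l₁.prod :=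
                mul_le_mul hmnle hmple (by omega) (by omega)
              have h2' : l₂.prod * l₁.prod = l₁.prod * l₂.prod := mul_comm _ _
              have hxle : l₁.prod * l₂.prod ≤ end_ := hprodsp ▸ hye
              omega
lemma recB_mem (end_ : Int) :
    ∀ (fuel : Nat) (l : List Int) (value : Int) (res : PySem.Set Int),
      (end_ - value).toNat + l.length < fuel → 1 ≤ value →
      (∀ m ∈ l, 2 ≤ m) → l.Pairwise (· ≤ ·) →
      ∀ x, x ∈ multsRecB end_ fuel l value res ↔
        x ∈ res ∨ ∃ seq : List Int, seq ≠ [] ∧ (∀ m ∈ seq, m ∈ l) ∧ x = value * seq.prod ∧ x ≤ end_ := by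
  intro fuel
  induction fuel with
  | zero => intro l value res hfuel; omega
  | succ fuel ih =>
    intro l value res hfuel hv h2 hsort x
    cases l with
    | nil =>
      simp only [multsRecB]
      constructor
      · exact Or.inl
      · rintro (hx | ⟨seq, hne, hmem, _, _⟩)
        · exact hx
        · cases seq with
          | nil => exact absurd rfl hne
          | cons a t => exact absurd (hmem a (List.mem_cons_self ..)) (by simp)
    | cons n rest =>
      rw [multsRecB]
      rcases List.pairwise_cons.mp hsort with ⟨hle, hrest⟩
      have hn2 : 2 ≤ n := h2 n (List.mem_cons_self ..)
      by_cases hbr : n * value > end_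
      · simp only [if_pos hbr]
        constructor
        · exact Or.inl
        · rintro (hx | ⟨seq, hne, hmem, rfl, hxe⟩)
          · exact hx
          · exfalso
            have hseqn : ∀ m ∈ seq, n ≤ m := by
              intro m hm
              rcases List.mem_cons.mp (hmem m hm) with rfl | hm'
              · exact le_refl _
              · exact hle m hm'
            have hps : n ≤ seq.prod :=
              le_prod_of_forall_le hne (by omega) hseqn
                (fun m hm => by have := hseqn m hm; omega)
            have : value * n ≤ value * seq.prod :=
              mul_le_mul_of_nonneg_left hps (by omega)
            have hc : n * value = value * n := mul_comm _ _
            omega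
      · simp only [if_neg hbr]
        have htemp_le : n * value ≤ end_ := by omega
        have hv1 : 1 ≤ n * value := by nlinarith
        have hvlt : value < n * value := by nlinarith
        have hfuel_in : (end_ - n * value).toNat + (n :: rest).length < fuel := by
          simp only [List.length_cons] at hfuel ⊢
          omega
        have hfuel_out : (end_ - value).toNat + rest.length < fuel := by
          simp only [List.length_cons] at hfuel
          omega
        rw [ih rest value _ hfuel_out hv (fun m hm => h2 m (List.mem_cons_of_mem _ hm)) hrest x]
        rw [ih (n :: rest) (n * value) _ hfuel_in (by omega) h2 hsort x]
        rw [PySem.Set.mem_add]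
        constructor
        · rintro (((hx | rfl) | ⟨seq, hne, hmem, rfl, hxe⟩) | ⟨seq, hne, hmem, rfl, hxe⟩)
          · exact Or.inl hx
          · exact Or.inr ⟨[n], by simp, by simp, by simp [mul_comm], htemp_le⟩
          · exact Or.inr ⟨n :: seq, by simp, by
              intro m hm
              rcases List.mem_cons.mp hm with rfl | hm'
              · exact List.mem_cons_self ..
              · exact hmem m hm', by simp [List.prod_cons]; ring, hxe⟩
          · exact Or.inr ⟨seq, hne, fun m hm => List.mem_cons_of_mem _ (hmem m hm), rfl, hxe⟩
        · rintro (hx | ⟨seq, hne, hmem, rfl, hxe⟩)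
          · exact Or.inl (Or.inl (Or.inl hx))
          · by_cases hns : n ∈ seq
            · rcases heq : seq.erase n with _ | ⟨a, t⟩
              · -- seq = [n]
                have hprod : seq.prod = n := by
                  have := List.prod_erase hns (l := seq)
                  rw [heq] at this
                  simpa using this.symm
                exact Or.inl (Or.inl (Or.inr (by rw [hprod, mul_comm])))
              · refine Or.inl (Or.inr ⟨seq.erase n, by simp [heq], ?_, ?_, hxe⟩)
                · intro m hm
                  exact hmem m (List.mem_of_mem_erase hm)
                · have := List.prod_erase hns (l := seq)
                  rw [← this]
                  ring
            · refine Or.inr ⟨seq, hne, ?_, rfl, hxe⟩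
              intro m hm
              rcases List.mem_cons.mp (hmem m hm) with h | h
              · exact absurd (h ▸ hm) hns
              · exact h
lemma loopA_nodup (nums_s : List Int) (end_ : Int) :
    ∀ (fuel : Nat) (mults prev : PySem.Set Int), mults.Nodup →
      (multsLoopA nums_s end_ fuel mults prev).Nodup := by
  intro fuel
  induction fuel with
  | zero => intro mults prev h; simpa [multsLoopA] using h
  | succ fuel ih =>
    intro mults prev h
    rw [multsLoopA]
    cases PySem.List.min? nums_s (fun x => x) with
    | none => exact h
    | some mn =>
      cases PySem.List.min? prev (fun x => x) with
      | none => exact h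
      | some mp =>
        by_cases hc : mn * mp ≤ end_
        · simp only [if_pos hc]
          exact ih _ _ (PySem.Set.nodup_update _ _ h)
        · simpa [if_neg hc] using h

lemma recB_nodup (end_ : Int) :
    ∀ (fuel : Nat) (l : List Int) (value : Int) (res : PySem.Set Int), res.Nodup →
      (multsRecB end_ fuel l value res).Nodup := by
  intro fuel
  induction fuel with
  | zero =>
    intro l value res h
    cases l with
    | nil => simpa [multsRecB] using h
    | cons n rest => simpa [multsRecB] using h
  | succ fuel ih =>
    intro l value res h
    cases l with
    | nil => simpa [multsRecB] using h
    | cons n rest =>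
      rw [multsRecB]
      by_cases hbr : n * value > end_
      · simpa [if_pos hbr] using h
      · simp only [if_neg hbr]
        exact ih _ _ _ (ih _ _ _ (PySem.Set.nodup_add _ _ h))

lemma sorted_sets_eq (sA sB : PySem.Set Int) (ndA : sA.Nodup) (ndB : sB.Nodup)
    (hmem : ∀ x, x ∈ sA ↔ x ∈ sB) :
    PySem.List.sorted sA (fun x => x) false = PySem.List.sorted sB (fun x => x) false := by
  have ndLA : (PySem.List.sorted sA (fun x => x) false).Nodup :=
    ((PySem.List.sorted_perm sA (fun x => x) false).nodup_iff).mpr ndA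
  have ndLB : (PySem.List.sorted sB (fun x => x) false).Nodup :=
    ((PySem.List.sorted_perm sB (fun x => x) false).nodup_iff).mpr ndB
  have hperm : (PySem.List.sorted sA (fun x => x) false).Perm
      (PySem.List.sorted sB (fun x => x) false) := by
    rw [List.perm_ext_iff_of_nodup ndLA ndLB]
    intro a
    rw [PySem.List.mem_sorted, PySem.List.mem_sorted, hmem a]
  refine hperm.eq_of_pairwise (fun a b _ _ h1 h2 => le_antisymm h1 h2) ?_ ?_
  · have := PySem.List.sorted_pairwise sA (fun x => x)
    simpa using this
  · have := PySem.List.sorted_pairwise sB (fun x => x)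
    simpa using this

lemma mults_equal_on_pre (nums : List Int) (end_ : Int)
    (hpre1 : nums ≠ []) (hpre2 : ∀ n ∈ nums, 2 ≤ n) :
    mults_of_nums nums end_ = mults_of_nums_alt nums end_ := by
  unfold mults_of_nums mults_of_nums_alt
  set nums_s := PySem.List.sorted nums (fun x => x) false with hns
  have hnsne : nums_s ≠ [] := by
    rw [hns, Ne, PySem.List.sorted_eq_nil_iff]
    exact hpre1
  have h2s : ∀ m ∈ nums_s, 2 ≤ m := by
    intro m hm
    exact hpre2 m ((PySem.List.mem_sorted nums (fun x => x) false m).mp (hns ▸ hm))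
  have hsort : nums_s.Pairwise (· ≤ ·) := by
    have := PySem.List.sorted_pairwise nums (fun x => x)
    simpa [hns] using this
  have hone : PySem.Set.add PySem.Set.empty (1 : Int) = [1] := rfl
  rw [hone]
  set setA := multsLoopA nums_s end_ (end_.toNat + 1) [1] [1] with hSA
  set setB := multsRecB end_ (end_.toNat + nums_s.length + 1) nums_s 1 [1] with hSB
  have memA : ∀ x, x ∈ setA ↔ GoodP nums_s end_ x := by
    intro x
    refine loopA_mem nums_s end_ hnsne h2s hsort (end_.toNat + 1) 0 [1] [1]
      (by simp) ?_ ?_ ?_ x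
    · intro p hp
      rcases List.mem_singleton.mp hp with rfl
      omega
    · intro y; simp [PrevP]
    · intro y
      constructor
      · intro hy
        exact Or.inl (List.mem_singleton.mp hy)
      · rintro (rfl | ⟨l, hlne, hlen, _, _, _⟩)
        · exact List.mem_singleton.mpr rfl
        · exact absurd (List.eq_nil_of_length_eq_zero (Nat.le_zero.mp hlen)) hlne
  have memB : ∀ x, x ∈ setB ↔ GoodP nums_s end_ x := by
    intro x
    rw [hSB, recB_mem end_ (end_.toNat + nums_s.length + 1) nums_s 1 [1]
      (by omega) (by omega) h2s hsort x]
    unfold GoodP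
    simp only [List.mem_singleton, one_mul]
  have ndA : setA.Nodup := loopA_nodup nums_s end_ _ _ _ (by simp)
  have ndB : setB.Nodup := recB_nodup end_ _ _ _ _ (by simp)
  exact sorted_sets_eq setA setB ndA ndB (fun a => (memA a).trans (memB a).symm)


lemma recB_neg_mem (end_ : Int) (hneg : end_ < 0) :
    ∀ (fuel : Nat) (l : List Int) (res : PySem.Set Int), l.length < fuel →
      l.Pairwise (· ≤ ·) →
      ∀ x, x ∈ multsRecB end_ fuel l 1 res ↔ x ∈ res ∨ (x ∈ l ∧ x ≤ end_) := by
  intro fuel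
  induction fuel with
  | zero => intro l res h; omega
  | succ fuel ih =>
    intro l res hlen hsort x
    cases l with
    | nil => simp [multsRecB]
    | cons n rest =>
      rw [multsRecB]
      rcases List.pairwise_cons.mp hsort with ⟨hle, hrest⟩
      by_cases hbr : n * 1 > end_
      · simp only [if_pos hbr]
        rw [mul_one] at hbr
        constructor
        · exact Or.inl
        · rintro (hx | ⟨hm, hxe⟩)
          · exact hx
          · exfalso
            rcases List.mem_cons.mp hm with rfl | hm'
            · omega
            · have := hle x hm'; omega
      · simp only [if_neg hbr]
        rw [mul_one] at hbr
        have hn_neg : n < 0 := by omega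
        have hchild : ∀ r : PySem.Set Int, multsRecB end_ fuel (n :: rest) (n * 1) r = r := by
          intro r
          rw [mul_one]
          cases fuel with
          | zero => rw [multsRecB]
          | succ f =>
            rw [multsRecB]
            have hx : n * n > end_ := by nlinarith
            rw [if_pos hx]
        rw [hchild]
        have hlen' : rest.length < fuel := by
          simp only [List.length_cons] at hlen; omega
        rw [ih rest _ hlen' hrest x, mul_one, PySem.Set.mem_add]
        constructor
        · rintro ((hx | rfl) | ⟨hm, hxe⟩)
          · exact Or.inl hx
          · exact Or.inr ⟨List.mem_cons_self .., by omega⟩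
          · exact Or.inr ⟨List.mem_cons_of_mem _ hm, hxe⟩
        · rintro (hx | ⟨hm, hxe⟩)
          · exact Or.inl (Or.inl hx)
          · rcases List.mem_cons.mp hm with rfl | hm'
            · exact Or.inl (Or.inr rfl)
            · exact Or.inr ⟨hm', hxe⟩

lemma mults_equal_on_gt (nums : List Int) (end_ : Int) (hne : nums ≠ [])
    (hgt : ∀ n ∈ nums, end_ < n) :
    mults_of_nums nums end_ = mults_of_nums_alt nums end_ := by
  unfold mults_of_nums mults_of_nums_alt
  set nums_s := PySem.List.sorted nums (fun x => x) false with hns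
  have hnsne : nums_s ≠ [] := by
    rw [hns, Ne, PySem.List.sorted_eq_nil_iff]; exact hne
  have hgts : ∀ m ∈ nums_s, end_ < m := fun m hm =>
    hgt m ((PySem.List.mem_sorted nums (fun x => x) false m).mp (hns ▸ hm))
  have hone : PySem.Set.add PySem.Set.empty (1 : Int) = [1] := rfl
  rw [hone]
  have hA : multsLoopA nums_s end_ (end_.toNat + 1) [1] [1] = [1] := by
    rw [multsLoopA]
    cases hmn : PySem.List.min? nums_s (fun x => x) with
    | none => rfl
    | some mn =>
      have h1 : PySem.List.min? ([1] : List Int) (fun x => x) = some 1 := rfl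
      have hc : ¬ (mn * 1 ≤ end_) := by
        have := hgts mn (PySem.List.min?_mem hmn); omega
      simp only [h1, if_neg hc]
  obtain ⟨n₀, rest, hcons⟩ := List.exists_cons_of_ne_nil hnsne
  have hB : multsRecB end_ (end_.toNat + nums_s.length + 1) nums_s 1 [1] = [1] := by
    rw [hcons, multsRecB]
    have hc : n₀ * 1 > end_ := by
      have := hgts n₀ (hcons ▸ List.mem_cons_self ..); omega
    rw [if_pos hc]
  show PySem.List.sorted (multsLoopA nums_s end_ (end_.toNat + 1) [1] [1]) (fun x => x) false =
    PySem.List.sorted (multsRecB end_ (end_.toNat + nums_s.length + 1) nums_s 1 [1]) (fun x => x) false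
  rw [hA, hB]

lemma mults_equal_on_neg (nums : List Int) (end_ : Int) (hne : nums ≠ [])
    (hneg : end_ < 0) :
    mults_of_nums nums end_ = mults_of_nums_alt nums end_ := by
  unfold mults_of_nums mults_of_nums_alt
  set nums_s := PySem.List.sorted nums (fun x => x) false with hns
  have hnsne : nums_s ≠ [] := by
    rw [hns, Ne, PySem.List.sorted_eq_nil_iff]; exact hne
  have hsort : nums_s.Pairwise (· ≤ ·) := by
    have := PySem.List.sorted_pairwise nums (fun x => x)
    simpa [hns] using this
  have hone : PySem.Set.add PySem.Set.empty (1 : Int) = [1] := rfl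
  rw [hone]
  have memA : ∀ x, x ∈ multsLoopA nums_s end_ (end_.toNat + 1) [1] [1] ↔
      x = 1 ∨ (x ∈ nums_s ∧ x ≤ end_) := by
    intro x
    rw [multsLoopA]
    cases hmn : PySem.List.min? nums_s (fun x => x) with
    | none => exact absurd ((PySem.List.min?_eq_none_iff nums_s (fun x => x)).mp hmn) hnsne
    | some mn =>
      have h1 : PySem.List.min? ([1] : List Int) (fun x => x) = some 1 := rfl
      simp only [h1]
      have hmn_mem : mn ∈ nums_s := PySem.List.min?_mem hmn
      by_cases hc : mn * 1 ≤ end_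
      · simp only [if_pos hc]
        have ht0 : end_.toNat = 0 := by omega
        rw [ht0, multsLoopA, PySem.Set.mem_update]
        have hcur : ∀ y, y ∈ multsCurA nums_s end_ [1] ↔ (y ∈ nums_s ∧ y ≤ end_) := by
          intro y
          have hfold : multsCurA nums_s end_ [1] =
              multsInnerA end_ 1 nums_s PySem.Set.empty := rfl
          rw [hfold, innerA_mem end_ 1 (le_refl 1) nums_s PySem.Set.empty hsort y]
          constructor
          · rintro (hy | ⟨n, hn, rfl, hye⟩)
            · exact absurd hy (by simp [PySem.Set.empty])
            · exact ⟨by simpa using hn, hye⟩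
          · rintro ⟨hy, hye⟩
            exact Or.inr ⟨y, hy, by omega, hye⟩
        rw [hcur x]
        simp only [List.mem_singleton]
      · simp only [if_neg hc]
        simp only [List.mem_singleton]
        constructor
        · exact Or.inl
        · rintro (rfl | ⟨hm, hxe⟩)
          · rfl
          · exfalso
            have := PySem.List.min?_isMin hmn x hm
            simp only at this
            omega
  have memB : ∀ x, x ∈ multsRecB end_ (end_.toNat + nums_s.length + 1) nums_s 1 [1] ↔
      x = 1 ∨ (x ∈ nums_s ∧ x ≤ end_) := by
    intro x
    rw [recB_neg_mem end_ hneg _ nums_s [1] (by omega) hsort x]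
    simp only [List.mem_singleton]
  have ndA : (multsLoopA nums_s end_ (end_.toNat + 1) [1] [1]).Nodup :=
    loopA_nodup nums_s end_ _ _ _ (by simp)
  have ndB : (multsRecB end_ (end_.toNat + nums_s.length + 1) nums_s 1 [1]).Nodup :=
    recB_nodup end_ _ _ _ _ (by simp)
  exact sorted_sets_eq _ _ ndA ndB (fun a => (memA a).trans (memB a).symm)

-- ===== VERDICT (by name: the statement is the Claim_ definition above) =====
theorem mults_of_nums_spec : Claim_equal_mults_of_nums := by
  intro nums end_ _ hpre
  unfold Spec_mults_of_nums
  obtain ⟨hne, hcase⟩ := hpre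
  rcases hcase with h | h | h
  · exact mults_equal_on_pre nums end_ hne h
  · exact mults_equal_on_gt nums end_ hne h
  · exact mults_equal_on_neg nums end_ hne h
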